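-- pv_equiv track=rewrite | github.com/cgtqwmwkhp-rgb/quality-governance-platform | scripts/governance/update_boundary_trend.py | _count_trailing_clean
-- ===== SOURCE A (Python) =====
-- def _count_trailing_clean(entries: list[dict]) -> int:
--     """Count how many of the most recent entries have check_passed=True."""
--     count = 0
--     for entry in reversed(entries):
--         if entry.get("check_passed"):
--             count += 1
--         else:
--             break
--     return count
-- ===== SOURCE B (Python) =====
-- def _count_trailing_clean(entries: list[dict]) -> int:
--     """Count how many of the most recent entries have check_passed=True."""
--     last_fail = -1
--     for i, entry in enumerate(entries):
--         if not entry.get("check_passed"):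
--             last_fail = i
--     return len(entries) - last_fail - 1
-- ===== Notes on version B (the rewrite author's own statement) =====
-- stated objective: alternative
-- what changed: Replaced the reversed scan with early break by a single forward pass that tracks the index of the most recent failing entry and derives the trailing-clean count arithmetically as len(entries) - last_fail - 1.
import Mathlib
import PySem

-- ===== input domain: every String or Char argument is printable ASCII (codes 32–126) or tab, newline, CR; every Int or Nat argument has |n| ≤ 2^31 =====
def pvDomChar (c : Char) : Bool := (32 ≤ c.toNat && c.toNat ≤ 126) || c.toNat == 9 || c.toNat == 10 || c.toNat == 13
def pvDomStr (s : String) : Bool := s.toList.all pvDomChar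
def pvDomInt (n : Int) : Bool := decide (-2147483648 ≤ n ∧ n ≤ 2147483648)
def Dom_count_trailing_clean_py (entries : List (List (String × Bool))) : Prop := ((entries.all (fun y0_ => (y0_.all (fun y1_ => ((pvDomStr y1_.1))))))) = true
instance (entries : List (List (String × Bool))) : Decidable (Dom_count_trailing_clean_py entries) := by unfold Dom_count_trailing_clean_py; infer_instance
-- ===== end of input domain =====

-- B replaces A's backward scan with early break by a forward pass tracking the last failing
-- index, returning len - last_fail - 1 (alternative decomposition, not faster).

-- ===== PORT A =====
-- entry.get("check_passed") is falsy iff the key is absent or maps to False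
def pvGetCheck (entry : List (String × Bool)) : Bool :=
  (PySem.Dict.mk entry).getD "check_passed" false

-- the for-loop over reversed(entries) with its break, state = count
def pvALoop (count : Int) : List (List (String × Bool)) → Int
  | [] => count
  | e :: rest => if pvGetCheck e then pvALoop (count + 1) rest else count

def count_trailing_clean_py (entries : List (List (String × Bool))) : Int :=
  pvALoop 0 entries.reverse

-- ===== PORT B =====
def count_trailing_clean_py_alt (entries : List (List (String × Bool))) : Int :=
  let last_fail :=
    (PySem.List.enumerate entries 0).foldl
      (fun lf p => if !(pvGetCheck p.2) then p.1 else lf) (-1)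
  (entries.length : Int) - last_fail - 1

-- ===== PRECONDITION & SPEC =====
def Spec_count_trailing_clean_py (entries : List (List (String × Bool))) (out : Int) : Prop := out = count_trailing_clean_py_alt entries
instance (entries : List (List (String × Bool))) (out : Int) : Decidable (Spec_count_trailing_clean_py entries out) := by unfold Spec_count_trailing_clean_py; infer_instance

-- ===== CLAIM (what is proved, stated in full; the proofs are below) =====
def Claim_equal_count_trailing_clean_py : Prop := ∀ (entries : List (List (String × Bool))), Dom_count_trailing_clean_py entries → Spec_count_trailing_clean_py entries (count_trailing_clean_py entries)

-- ===== LEMMAS AND PROOFS =====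
theorem pvALoop_shift (c : Int) (l : List (List (String × Bool))) :
    pvALoop c l = c + pvALoop 0 l := by
  induction l generalizing c with
  | nil => simp [pvALoop]
  | cons e rest ih =>
    simp only [pvALoop]
    by_cases h : pvGetCheck e
    · simp [h]; rw [ih (c + 1), ih 1]; ring
    · simp [h]

theorem pvKey (l : List (List (String × Bool))) :
    pvALoop 0 l.reverse =
      (l.length : Int) -
        ((PySem.List.enumerate l 0).foldl
          (fun lf p => if !(pvGetCheck p.2) then p.1 else lf) (-1)) - 1 := by
  induction l using List.reverseRecOn with
  | nil => simp [pvALoop, PySem.List.enumerate]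
  | append_singleton l e ih =>
    rw [List.reverse_append]
    simp only [List.reverse_singleton, List.singleton_append, pvALoop,
      PySem.List.enumerate_append, List.foldl_append, List.length_append,
      List.length_singleton]
    by_cases h : pvGetCheck e
    · rw [pvALoop_shift]
      simp [h, PySem.List.enumerate, ih]
      ring
    · simp [h, PySem.List.enumerate]

-- ===== VERDICT (by name: the statement is the Claim_ definition above) =====
theorem count_trailing_clean_py_spec : Claim_equal_count_trailing_clean_py := by
  intro entries _
  unfold Spec_count_trailing_clean_py count_trailing_clean_py count_trailing_clean_py_alt
  exact pvKey entries
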